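-- pv_equiv track=rewrite | github.com/Waknis/mlir-softmax-backend | experiments/fx_nvrtc/compiler.py | _broadcast_strides
-- ===== SOURCE A (Python) =====
-- from typing import Any, Sequence
--
-- def _broadcast_strides(input_shape: Sequence[int], output_shape: Sequence[int]) -> tuple[int, ...]:
--     rank_out = len(output_shape)
--     rank_in = len(input_shape)
--     if rank_in > rank_out:
--         raise ValueError(f"Input rank {rank_in} cannot broadcast to output rank {rank_out}")
--
--     contig_in: list[int] = []
--     running = 1
--     for dim in reversed(input_shape):
--         contig_in.append(running)
--         running *= int(dim)
--     contig_in = list(reversed(contig_in))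
--
--     pad = rank_out - rank_in
--     aligned_shape = (1,) * pad + tuple(int(d) for d in input_shape)
--     aligned_strides = (0,) * pad + tuple(contig_in)
--
--     out: list[int] = []
--     for in_dim, out_dim, stride in zip(aligned_shape, output_shape, aligned_strides):
--         if in_dim == out_dim:
--             out.append(int(stride))
--         elif in_dim == 1:
--             out.append(0)
--         else:
--             raise ValueError(f"Cannot broadcast dim {in_dim} to {out_dim}")
--     return tuple(out)
-- ===== SOURCE B (Python) =====
-- from typing import Any, Sequence
--
-- def _broadcast_strides(input_shape: Sequence[int], output_shape: Sequence[int]) -> tuple[int, ...]: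
--     rank_out = len(output_shape)
--     rank_in = len(input_shape)
--     if rank_in > rank_out:
--         raise ValueError(f"Input rank {rank_in} cannot broadcast to output rank {rank_out}")
--
--     pad = rank_out - rank_in
--     out: list[int] = []
--     running = 1
--     for j in range(rank_out - 1, -1, -1):
--         i = j - pad
--         if i < 0:
--             out.append(0)
--         else:
--             d = int(input_shape[i])
--             if d == output_shape[j]:
--                 out.append(running)
--             elif d == 1:
--                 out.append(0)
--             else:
--                 raise ValueError(f"Cannot broadcast dim {d} to {output_shape[j]}")
--             running *= d
--     return tuple(reversed(out))
-- ===== Notes on version B (the rewrite author's own statement) =====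
-- stated objective: alternative
-- what changed: A's three phases (build contiguous strides on reversed input, pad shape/strides tuples, forward zip loop) are fused into one right-to-left index loop that threads the running contiguous stride and emits each output stride inline, reversing once at the end; no aligned tuples or stride list are materialised.
import Mathlib
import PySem

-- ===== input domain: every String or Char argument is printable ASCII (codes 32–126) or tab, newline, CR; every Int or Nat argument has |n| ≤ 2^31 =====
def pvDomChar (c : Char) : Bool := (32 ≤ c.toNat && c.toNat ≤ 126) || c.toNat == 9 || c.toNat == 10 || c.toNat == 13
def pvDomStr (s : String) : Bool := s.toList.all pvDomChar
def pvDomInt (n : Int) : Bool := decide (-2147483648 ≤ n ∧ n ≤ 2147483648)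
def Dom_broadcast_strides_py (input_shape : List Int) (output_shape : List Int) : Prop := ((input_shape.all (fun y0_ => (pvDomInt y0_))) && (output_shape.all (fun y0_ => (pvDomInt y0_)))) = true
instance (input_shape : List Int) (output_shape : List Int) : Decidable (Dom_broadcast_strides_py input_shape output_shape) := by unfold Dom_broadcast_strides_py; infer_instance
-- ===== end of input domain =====

-- B fuses A's three phases (reversed contiguous-stride build, padding, forward zip loop)
-- into one right-to-left pass threading the running stride; same O(n) cost ("alternative").

-- ===== PORT A =====
-- A's forward zip loop over (in_dim, out_dim, stride); `none` = the ValueError A raises there.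
def pvA_loop : List (Int × Int × Int) → List Int → Option (List Int)
  | [], out => some out
  | (d, od, s) :: rest, out =>
    if d == od then pvA_loop rest (out ++ [s])
    else if d == 1 then pvA_loop rest (out ++ [0])
    else none

def broadcast_strides_py (input_shape : List Int) (output_shape : List Int) : List Int :=
  let rank_out : Int := output_shape.length
  let rank_in : Int := input_shape.length
  if rank_in > rank_out then []   -- A raises ValueError here; outside Pre_
  else
    -- contig_in: append `running` then multiply, over reversed input, then reverse
    let st := input_shape.reverse.foldl
      (fun (acc : List Int × Int) dim => (acc.1 ++ [acc.2], acc.2 * dim)) ([], 1)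
    let contig_in := st.1.reverse
    let pad := output_shape.length - input_shape.length
    let aligned_shape := List.replicate pad (1 : Int) ++ input_shape
    let aligned_strides := List.replicate pad (0 : Int) ++ contig_in
    match pvA_loop (aligned_shape.zip (output_shape.zip aligned_strides)) [] with
    | some out => out
    | none => []                  -- A raises ValueError here; outside Pre_

-- ===== PORT B =====
-- B's loop runs j from rank_out-1 down to 0; ported as recursion on the reversed lists
-- (the reversed output axes paired with the reversed input dims, input exhausting first).
def pvB_loop : List Int → List Int → Int → List Int → Option (List Int)
  | [], _, _, out => some out
  | _ :: outs, [], running, out => pvB_loop outs [] running (out ++ [0])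
  | od :: outs, d :: ins, running, out =>
    if d == od then pvB_loop outs ins (running * d) (out ++ [running])
    else if d == 1 then pvB_loop outs ins (running * d) (out ++ [0])
    else none                     -- B raises ValueError here; outside Pre_

def broadcast_strides_py_alt (input_shape : List Int) (output_shape : List Int) : List Int :=
  if (input_shape.length : Int) > (output_shape.length : Int) then []  -- B raises; outside Pre_
  else
    match pvB_loop output_shape.reverse input_shape.reverse 1 [] with
    | some out => out.reverse
    | none => []                  -- B raises; outside Pre_

-- ===== PRECONDITION & SPEC =====
-- Pre_ excludes exactly the inputs on which Python A raises ValueError: an input rank larger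
-- than the output rank, or some right-aligned input dim that neither equals the matching
-- output dim nor is 1.
def Pre_broadcast_strides_py (input_shape : List Int) (output_shape : List Int) : Prop :=
  input_shape.length ≤ output_shape.length ∧
  ∀ i ∈ List.range input_shape.length,
    input_shape.getD i 0 = output_shape.getD (output_shape.length - input_shape.length + i) 0 ∨
    input_shape.getD i 0 = 1

instance (input_shape : List Int) (output_shape : List Int) : Decidable (Pre_broadcast_strides_py input_shape output_shape) := by unfold Pre_broadcast_strides_py; infer_instance

def pvWitness_broadcast_strides_py : List Int × List Int := ([3, 1], [2, 3, 4])

def Spec_broadcast_strides_py (input_shape : List Int) (output_shape : List Int) (out : List Int) : Prop := out = broadcast_strides_py_alt input_shape output_shape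
instance (input_shape : List Int) (output_shape : List Int) (out : List Int) : Decidable (Spec_broadcast_strides_py input_shape output_shape out) := by unfold Spec_broadcast_strides_py; infer_instance

-- ===== CLAIM (what is proved, stated in full; the proofs are below) =====
def Claim_equal_broadcast_strides_py : Prop := ∀ (input_shape : List Int) (output_shape : List Int), Dom_broadcast_strides_py input_shape output_shape → Pre_broadcast_strides_py input_shape output_shape → Spec_broadcast_strides_py input_shape output_shape (broadcast_strides_py input_shape output_shape)

-- ===== LEMMAS AND PROOFS =====

-- accumulator-free version of A's zip loop
def pvFA : List (Int × Int × Int) → Option (List Int)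
  | [] => some []
  | (d, od, s) :: rest =>
    if d == od then (pvFA rest).map (s :: ·)
    else if d == 1 then (pvFA rest).map (0 :: ·)
    else none

-- accumulator-free version of B's loop
def pvGB : List Int → List Int → Int → Option (List Int)
  | [], _, _ => some []
  | _ :: outs, [], running => (pvGB outs [] running).map (0 :: ·)
  | od :: outs, d :: ins, running =>
    if d == od then (pvGB outs ins (running * d)).map (running :: ·)
    else if d == 1 then (pvGB outs ins (running * d)).map (0 :: ·)
    else none

-- suffix products (the contiguous strides of a shape)
def pvSuf : List Int → List Int
  | [] => []
  | _ :: t => t.prod :: pvSuf t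

-- exclusive prefix products, as A's first loop accumulates them
def pvPre (r : Int) : List Int → List Int
  | [] => []
  | x :: t => r :: pvPre (r * x) t

lemma pvA_loop_acc (L : List (Int × Int × Int)) (out : List Int) :
    pvA_loop L out = (pvFA L).map (out ++ ·) := by
  induction L generalizing out with
  | nil => simp [pvA_loop, pvFA]
  | cons p rest ih =>
    obtain ⟨d, od, s⟩ := p
    simp only [pvA_loop, pvFA]
    split_ifs <;> simp [ih] <;> cases pvFA rest <;> simp

lemma pvB_loop_acc (outs ins : List Int) (r : Int) (out : List Int) :
    pvB_loop outs ins r out = (pvGB outs ins r).map (out ++ ·) := by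
  induction outs generalizing ins r out with
  | nil => simp [pvB_loop, pvGB]
  | cons od outs ih =>
    cases ins with
    | nil =>
      simp only [pvB_loop, pvGB, ih]
      cases pvGB outs [] r <;> simp
    | cons d ins =>
      simp only [pvB_loop, pvGB]
      split_ifs <;> simp [ih] <;> cases pvGB outs ins (r * d) <;> simp

lemma pvFoldl_pre (xs : List Int) (c : List Int) (r : Int) :
    (xs.foldl (fun (acc : List Int × Int) dim => (acc.1 ++ [acc.2], acc.2 * dim)) (c, r)).1
      = c ++ pvPre r xs := by
  induction xs generalizing c r with
  | nil => simp [pvPre]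
  | cons x t ih => simp [List.foldl, ih, pvPre]

lemma pvPre_append (r : Int) (xs : List Int) (d : Int) :
    pvPre r (xs ++ [d]) = pvPre r xs ++ [r * xs.prod] := by
  induction xs generalizing r with
  | nil => simp [pvPre]
  | cons x t ih => simp [pvPre, ih, mul_assoc]

lemma pvSuf_eq_rev_pre (ins : List Int) :
    pvSuf ins = (pvPre 1 ins.reverse).reverse := by
  induction ins with
  | nil => simp [pvSuf, pvPre]
  | cons d t ih =>
    simp [pvSuf, ih, pvPre_append]

-- B, with input exhausted, appends a 0 for the leading output axis
lemma pvGB_pad (l m : List Int) (h : m.length ≤ l.length) (r : Int) (od : Int) :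
    pvGB (l ++ [od]) m r = (pvGB l m r).map (· ++ [0]) := by
  induction l generalizing m r with
  | nil =>
    cases m with
    | nil => simp [pvGB]
    | cons _ _ => simp at h
  | cons x l ih =>
    cases m with
    | nil =>
      simp only [List.cons_append, pvGB, ih [] (by simp) r]
      cases pvGB l [] r <;> simp
    | cons y m =>
      simp only [List.length_cons, Nat.add_le_add_iff_right] at h
      simp only [List.cons_append, pvGB]
      split_ifs <;> simp [ih m h] <;> cases pvGB l m (r * y) <;> simp

-- B, at the leading output axis, pairs it with the leading input dim with the full product as running
lemma pvGB_last (l m : List Int) (h : m.length = l.length) (r od d : Int) :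
    pvGB (l ++ [od]) (m ++ [d]) r =
      (pvGB l m r).bind (fun res =>
        if d == od then some (res ++ [r * m.prod])
        else if d == 1 then some (res ++ [0])
        else none) := by
  induction l generalizing m r with
  | nil =>
    cases m with
    | cons _ _ => simp at h
    | nil =>
      simp only [List.nil_append, pvGB]
      split_ifs <;> simp
  | cons x l ih =>
    cases m with
    | nil => simp at h
    | cons y m =>
      simp only [List.length_cons, Nat.add_right_cancel_iff] at h
      simp only [List.cons_append, pvGB, ih m h (r * y)]
      by_cases h1 : y == x
      · simp only [h1, if_true]
        cases pvGB l m (r * y) with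
        | none => rfl
        | some v =>
          by_cases h2 : d == od
          · simp [h2, mul_assoc]
          · by_cases h3 : d == 1 <;> simp [h2, h3]
      · by_cases h1b : y == 1
        · simp only [h1, h1b, if_true]
          cases pvGB l m (r * y) with
          | none => rfl
          | some v =>
            by_cases h2 : d == od
            · simp [h2, mul_assoc]
            · by_cases h3 : d == 1 <;> simp [h2, h3]
        · simp [h1, h1b]

-- the main bridge: A's padded-zip forward loop equals B's reversed loop, reversed
lemma pvMain (ins outs : List Int) (h : ins.length ≤ outs.length) :
    pvFA ((List.replicate (outs.length - ins.length) (1 : Int) ++ ins).zip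
            (outs.zip (List.replicate (outs.length - ins.length) (0 : Int) ++ pvSuf ins)))
      = (pvGB outs.reverse ins.reverse 1).map List.reverse := by
  induction outs generalizing ins with
  | nil =>
    have : ins = [] := List.eq_nil_of_length_eq_zero (Nat.le_zero.mp h)
    subst this
    simp [pvFA, pvGB, pvSuf]
  | cons od outs ih =>
    by_cases hp : ins.length = (od :: outs).length
    · -- pad = 0: ins is nonempty, leading dims pair up
      cases ins with
      | nil => simp at hp
      | cons d t =>
        simp only [List.length_cons, Nat.add_right_cancel_iff] at hp
        have hz : (od :: outs).length - (d :: t).length = 0 := by simp [hp]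
        simp only [hz, List.replicate_zero, List.nil_append, pvSuf, List.zip_cons_cons, pvFA]
        have ht : outs.length - t.length = 0 := by omega
        have ihe := ih t (by omega)
        rw [ht] at ihe
        simp only [List.replicate_zero, List.nil_append] at ihe
        have hlast := pvGB_last outs.reverse t.reverse (by simp [hp]) 1 od d
        simp only [List.reverse_cons, hlast]
        split_ifs with h1 h2
        · rw [ihe]
          cases pvGB outs.reverse t.reverse 1 <;> simp [List.prod_reverse]
        · rw [ihe]
          cases pvGB outs.reverse t.reverse 1 <;> simp
        · cases hg : pvGB outs.reverse t.reverse 1 <;> simp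
    · -- pad > 0: leading aligned dim is 1 with stride 0
      have hlt : ins.length < (od :: outs).length := lt_of_le_of_ne h hp
      have hpos : 0 < (od :: outs).length - ins.length := by omega
      obtain ⟨k, hk⟩ : ∃ k, (od :: outs).length - ins.length = k + 1 :=
        ⟨(od :: outs).length - ins.length - 1, by omega⟩
      have hk' : outs.length - ins.length = k := by simp at hk; omega
      rw [hk]
      simp only [List.replicate_succ, List.cons_append, List.zip_cons_cons, pvFA]
      have : (1 : Int) == od → True := fun _ => trivial
      have ihe := ih ins (by simp at hlt; omega)
      rw [hk'] at ihe
      have hpad := pvGB_pad outs.reverse ins.reverse (by simp; simp at hlt; omega) 1 od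
      simp only [List.reverse_cons, hpad]
      split_ifs with h1 h2
      · -- 1 == od: stride appended is 0
        rw [ihe]
        cases pvGB outs.reverse ins.reverse 1 <;> simp
      · rw [ihe]
        cases pvGB outs.reverse ins.reverse 1 <;> simp
      · exfalso; exact h2 rfl

-- ===== VERDICT (by name: the statement is the Claim_ definition above) =====
theorem broadcast_strides_py_spec : Claim_equal_broadcast_strides_py := by
  intro ins outs _ hpre
  unfold Spec_broadcast_strides_py broadcast_strides_py broadcast_strides_py_alt
  obtain ⟨hlen, _⟩ := hpre
  have hgt : ¬ ((ins.length : Int) > (outs.length : Int)) := by exact_mod_cast not_lt.mpr hlen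
  simp only [hgt, if_false]
  rw [pvFoldl_pre, pvA_loop_acc, pvB_loop_acc]
  simp only [List.nil_append]
  have hcontig : (pvPre 1 ins.reverse).reverse = pvSuf ins := (pvSuf_eq_rev_pre ins).symm
  rw [hcontig, pvMain ins outs hlen]
  cases pvGB outs.reverse ins.reverse 1 <;> simp
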